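-- pv_equiv track=rewrite | github.com/TeresaLin0725/CS5260_Group12_RepoAgent | api/agent/scheduler.py | _infer_from_recommendation
-- ===== SOURCE A (Python) =====
-- from typing import Awaitable, Callable, List, Optional
--
-- def _infer_from_recommendation(text: str) -> Optional[str]:
--     """Detect format recommendation patterns in the LLM response."""
--     normalized = (text or "").lower()
--     # Map recommendation keywords to action tags
--     pdf_signals = ("pdf", "报告", "技术报告", "technical report")
--     ppt_signals = ("ppt", "演示", "幻灯片", "presentation", "slides")
--     video_signals = ("视频", "video", "walkthrough")
--     poster_signals = ("poster", "画报", "海报", "infographic", "图文海报", "pictorial")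
--
--     recommendation_contexts = (
--         "recommend", "suggest", "best", "most suitable", "choose",
--         "推荐", "建议", "最合适", "最适合", "选择",
--     )
--     has_recommendation = any(ctx in normalized for ctx in recommendation_contexts)
--     if not has_recommendation:
--         return None
--
--     pdf_score = sum(1 for s in pdf_signals if s in normalized)
--     ppt_score = sum(1 for s in ppt_signals if s in normalized)
--     video_score = sum(1 for s in video_signals if s in normalized)
--     poster_score = sum(1 for s in poster_signals if s in normalized)
--
--     scores = {
--         "[ACTION:GENERATE_PDF]": pdf_score,
--         "[ACTION:GENERATE_PPT]": ppt_score,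
--         "[ACTION:GENERATE_VIDEO]": video_score,
--         "[ACTION:GENERATE_POSTER]": poster_score,
--     }
--     ranked = sorted(scores.items(), key=lambda x: x[1], reverse=True)
--     if ranked[0][1] <= 0:
--         return None
--     if len(ranked) > 1 and ranked[0][1] == ranked[1][1]:
--         return None
--     return ranked[0][0]
-- ===== SOURCE B (Python) =====
-- from typing import Optional
--
-- _TAG_SIGNALS = (
--     ("[ACTION:GENERATE_PDF]", ("pdf", "报告", "技术报告", "technical report")),
--     ("[ACTION:GENERATE_PPT]", ("ppt", "演示", "幻灯片", "presentation", "slides")),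
--     ("[ACTION:GENERATE_VIDEO]", ("视频", "video", "walkthrough")),
--     ("[ACTION:GENERATE_POSTER]", ("poster", "画报", "海报", "infographic", "图文海报", "pictorial")),
-- )
--
-- _CONTEXTS = (
--     "recommend", "suggest", "best", "most suitable", "choose",
--     "推荐", "建议", "最合适", "最适合", "选择",
-- )
--
--
-- def _infer_from_recommendation(text):
--     """Detect format recommendation patterns in the LLM response."""
--     normalized = (text or "").lower()
--     if not any(ctx in normalized for ctx in _CONTEXTS):
--         return None
--     scored = [(tag, sum(1 for s in signals if s in normalized))
--               for tag, signals in _TAG_SIGNALS]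
--     best_tag = None
--     best_score = -1
--     tie_count = 0
--     for tag, score in scored:
--         if score > best_score:
--             best_tag, best_score, tie_count = tag, score, 1
--         elif score == best_score:
--             tie_count += 1
--     if best_score <= 0 or tie_count > 1:
--         return None
--     return best_tag
-- ===== Notes on version B (the rewrite author's own statement) =====
-- stated objective: simpler
-- what changed: Replaces A's dict construction plus stable reverse sort and ranked[0]/ranked[1] inspection by a single linear scan over the (tag, score) pairs that tracks the best tag, best score and the multiplicity of the best score.
import Mathlib
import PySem

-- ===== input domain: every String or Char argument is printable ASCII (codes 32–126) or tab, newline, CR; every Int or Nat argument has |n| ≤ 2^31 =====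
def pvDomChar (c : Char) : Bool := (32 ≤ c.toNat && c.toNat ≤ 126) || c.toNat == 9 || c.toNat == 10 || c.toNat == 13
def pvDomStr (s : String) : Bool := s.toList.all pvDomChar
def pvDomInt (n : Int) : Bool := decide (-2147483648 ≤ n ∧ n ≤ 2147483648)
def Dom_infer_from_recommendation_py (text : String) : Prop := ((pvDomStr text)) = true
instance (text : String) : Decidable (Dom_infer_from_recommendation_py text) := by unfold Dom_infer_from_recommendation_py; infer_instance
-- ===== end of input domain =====

-- B replaces A's dict + stable sort + rank inspection by a single linear scan tracking the
-- best tag, best score and the multiplicity of the best score (objective: simpler).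

-- ===== PORT A =====
-- sum(1 for s in signals if s in normalized)
def pvScoreA (normalized : String) (signals : List String) : Int :=
  signals.foldl (fun acc s => if PySem.Str.isIn s normalized then acc + 1 else acc) 0

-- the tail of A after the four scores are known: dict literal, stable reverse sort by score,
-- ranked[0]/ranked[1] inspection (the list has 4 elements, so indexing never raises; match is exact)
def pvRankA (pdf_score ppt_score video_score poster_score : Int) : Option String :=
  let scores := PySem.Dict.ofList
    [("[ACTION:GENERATE_PDF]", pdf_score), ("[ACTION:GENERATE_PPT]", ppt_score),
     ("[ACTION:GENERATE_VIDEO]", video_score), ("[ACTION:GENERATE_POSTER]", poster_score)]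
  let ranked := PySem.List.sorted scores.items (fun x => x.2) true
  match ranked with
  | [] => none
  | (t0, s0) :: rest =>
    if s0 ≤ 0 then none
    else
      match rest with
      | (_, s1) :: _ => if s0 == s1 then none else some t0
      | [] => some t0

-- '(text or "").lower()': for a string, (text or "") is "" when text is empty, i.e. text itself.
def infer_from_recommendation_py (text : String) : Option String :=
  let normalized := PySem.Str.lower text
  let pdf_signals := ["pdf", "报告", "技术报告", "technical report"]
  let ppt_signals := ["ppt", "演示", "幻灯片", "presentation", "slides"]
  let video_signals := ["视频", "video", "walkthrough"]
  let poster_signals := ["poster", "画报", "海报", "infographic", "图文海报", "pictorial"]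
  if ["recommend", "suggest", "best", "most suitable", "choose",
      "推荐", "建议", "最合适", "最适合", "选择"].any (fun ctx => PySem.Str.isIn ctx normalized) then
    pvRankA (pvScoreA normalized pdf_signals) (pvScoreA normalized ppt_signals)
            (pvScoreA normalized video_signals) (pvScoreA normalized poster_signals)
  else none

-- ===== PORT B =====
def pvTagSignals : List (String × List String) :=
  [("[ACTION:GENERATE_PDF]", ["pdf", "报告", "技术报告", "technical report"]),
   ("[ACTION:GENERATE_PPT]", ["ppt", "演示", "幻灯片", "presentation", "slides"]),
   ("[ACTION:GENERATE_VIDEO]", ["视频", "video", "walkthrough"]),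
   ("[ACTION:GENERATE_POSTER]", ["poster", "画报", "海报", "infographic", "图文海报", "pictorial"])]

-- one step of B's scan: state = (best_tag, best_score, tie_count)
def pvStepB (st : Option String × Int × Int) (p : String × Int) : Option String × Int × Int :=
  if p.2 > st.2.1 then (some p.1, p.2, 1)
  else if p.2 == st.2.1 then (st.1, st.2.1, st.2.2 + 1)
  else st

def pvScanB (scored : List (String × Int)) : Option String :=
  let st := scored.foldl pvStepB (none, -1, 0)
  if st.2.1 ≤ 0 || st.2.2 > 1 then none else st.1

def infer_from_recommendation_py_alt (text : String) : Option String :=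
  let normalized := PySem.Str.lower text
  if ["recommend", "suggest", "best", "most suitable", "choose",
      "推荐", "建议", "最合适", "最适合", "选择"].any (fun ctx => PySem.Str.isIn ctx normalized) then
    pvScanB (pvTagSignals.map (fun p => (p.1, pvScoreA normalized p.2)))
  else none

-- ===== PRECONDITION & SPEC =====
def Spec_infer_from_recommendation_py (text : String) (out : Option String) : Prop := out = infer_from_recommendation_py_alt text
instance (text : String) (out : Option String) : Decidable (Spec_infer_from_recommendation_py text out) := by unfold Spec_infer_from_recommendation_py; infer_instance

-- ===== CLAIM (what is proved, stated in full; the proofs are below) =====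
def Claim_equal_infer_from_recommendation_py : Prop := ∀ (text : String), Dom_infer_from_recommendation_py text → Spec_infer_from_recommendation_py text (infer_from_recommendation_py text)

-- ===== LEMMAS AND PROOFS =====

-- each score is between 0 and the number of signals
lemma pvScoreA_bounds (n : String) (sigs : List String) :
    0 ≤ pvScoreA n sigs ∧ pvScoreA n sigs ≤ (sigs.length : Int) := by
  have key : ∀ (sigs : List String) (acc : Int),
      acc ≤ sigs.foldl (fun acc s => if PySem.Str.isIn s n then acc + 1 else acc) acc ∧
      sigs.foldl (fun acc s => if PySem.Str.isIn s n then acc + 1 else acc) acc ≤ acc + sigs.length := by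
    intro sigs
    induction sigs with
    | nil => intro acc; simp
    | cons s t ih =>
      intro acc
      rw [List.foldl_cons, List.length_cons]
      by_cases h : PySem.Str.isIn s n = true
      · rw [if_pos h]; have := ih (acc + 1); push_cast at *; omega
      · rw [if_neg h]; have := ih acc; push_cast at *; omega
  have := key sigs 0
  unfold pvScoreA
  omega

-- the core equivalence, on the bounded score space (decided exhaustively)
lemma pvRankA_eq_pvScanB : ∀ (p : Fin 5) (q : Fin 6) (v : Fin 4) (o : Fin 7),
    pvRankA (p.val : Int) (q.val : Int) (v.val : Int) (o.val : Int) =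
      pvScanB [("[ACTION:GENERATE_PDF]", (p.val : Int)), ("[ACTION:GENERATE_PPT]", (q.val : Int)),
               ("[ACTION:GENERATE_VIDEO]", (v.val : Int)), ("[ACTION:GENERATE_POSTER]", (o.val : Int))] := by
  decide

-- ===== VERDICT (by name: the statement is the Claim_ definition above) =====
theorem infer_from_recommendation_py_spec : Claim_equal_infer_from_recommendation_py := by
  intro text _
  unfold Spec_infer_from_recommendation_py infer_from_recommendation_py infer_from_recommendation_py_alt
  simp only [pvTagSignals, List.map]
  set n := PySem.Str.lower text with hn
  split
  · obtain ⟨hp0, hp1⟩ := pvScoreA_bounds n ["pdf", "报告", "技术报告", "technical report"]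
    obtain ⟨hq0, hq1⟩ := pvScoreA_bounds n ["ppt", "演示", "幻灯片", "presentation", "slides"]
    obtain ⟨hv0, hv1⟩ := pvScoreA_bounds n ["视频", "video", "walkthrough"]
    obtain ⟨ho0, ho1⟩ := pvScoreA_bounds n ["poster", "画报", "海报", "infographic", "图文海报", "pictorial"]
    simp only [List.length] at hp1 hq1 hv1 ho1
    have hp := pvRankA_eq_pvScanB ⟨(pvScoreA n ["pdf", "报告", "技术报告", "technical report"]).toNat, by omega⟩
      ⟨(pvScoreA n ["ppt", "演示", "幻灯片", "presentation", "slides"]).toNat, by omega⟩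
      ⟨(pvScoreA n ["视频", "video", "walkthrough"]).toNat, by omega⟩
      ⟨(pvScoreA n ["poster", "画报", "海报", "infographic", "图文海报", "pictorial"]).toNat, by omega⟩
    rw [Int.toNat_of_nonneg hp0, Int.toNat_of_nonneg hq0, Int.toNat_of_nonneg hv0, Int.toNat_of_nonneg ho0] at hp
    exact hp
  · rfl
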